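-- pv_equiv track=rewrite | github.com/Ekubbo/codewars | 6 kyu/dashatize_it.py | dashatize
-- ===== SOURCE A (Python) =====
-- def is_even(x):
--     return 0 is x % 2
--
-- def dashatize(num):
--     if num is None:
--         return "None"
--
--     num_str = str(abs(num))
--
--     result = "".join([s if is_even(int(s)) else "-{}-".format(s) for s in num_str])
--
--     if result[0] == '-': result = result[1:]
--     if result[-1] == '-': result = result[:-1]
--
--     return "".join([s for i, s in enumerate(result) if s != '-' or s == '-' and result[i-1] != '-'])
-- ===== SOURCE B (Python) =====
-- def dashatize(num):
--     if num is None: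
--         return "None"
--     out = ""
--     prev_odd = False
--     for d in str(abs(num)):
--         odd = int(d) % 2 == 1
--         if out and (odd or prev_odd):
--             out += "-"
--         out += d
--         prev_odd = odd
--     return out
-- ===== Notes on version B (the rewrite author's own statement) =====
-- stated objective: simpler
-- what changed: Replaces A's three-phase pipeline (wrap each odd digit in dashes, trim one edge dash from each end, then an index-peeking filter to drop doubled dashes) by a single accumulating pass over the digits that emits a dash before a digit exactly when it or the previous digit is odd.
import Mathlib
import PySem

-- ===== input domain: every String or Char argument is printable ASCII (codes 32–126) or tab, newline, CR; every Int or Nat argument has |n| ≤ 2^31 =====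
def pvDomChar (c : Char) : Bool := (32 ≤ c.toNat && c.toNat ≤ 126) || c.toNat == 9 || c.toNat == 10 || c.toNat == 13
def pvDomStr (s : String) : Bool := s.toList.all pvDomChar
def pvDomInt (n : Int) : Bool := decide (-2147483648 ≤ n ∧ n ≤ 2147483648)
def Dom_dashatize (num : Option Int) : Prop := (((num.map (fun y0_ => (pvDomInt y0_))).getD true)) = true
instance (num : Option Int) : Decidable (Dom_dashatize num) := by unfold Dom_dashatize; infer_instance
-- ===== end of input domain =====

-- B replaces A's wrap/trim/index-filter pipeline by one accumulating pass over the digits (objective: simpler).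

-- ===== PORT A =====
-- helper is_even(x): `0 is x % 2` — an identity test in A, but equal to == for these small ints
def pyIsEven (x : Int) : Bool := PySem.Int.mod x 2 == 0

def dashatize (num : Option Int) : String :=
  match num with
  | none => "None"
  | some n =>
    let numStr : List Char := PySem.Int.toChars |n|
    -- "".join([s if is_even(int(s)) else "-{}-".format(s) for s in num_str])
    let result : List Char :=
      (numStr.map (fun s =>
        if pyIsEven ((PySem.Int.ofChars? [s]).getD 0) then [s] else ['-'] ++ [s] ++ ['-'])).flatten
    -- if result[0] == '-': result = result[1:]   (result is never empty on these inputs, so pyGet? never misses)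
    let result1 : List Char :=
      if PySem.List.pyGet? result 0 == some '-' then PySem.List.slice result (some 1) none else result
    -- if result[-1] == '-': result = result[:-1]
    let result2 : List Char :=
      if PySem.List.pyGet? result1 (-1) == some '-' then PySem.List.slice result1 none (some (-1)) else result1
    -- "".join([s for i, s in enumerate(result) if s != '-' or s == '-' and result[i-1] != '-'])
    String.ofList (((PySem.List.enumerate result2).filter
      (fun is => is.2 != '-' || (is.2 == '-' && !(PySem.List.pyGetD result2 (is.1 - 1) ' ' == '-')))).map (·.2))

-- ===== PORT B =====
def dashatize_alt (num : Option Int) : String :=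
  match num with
  | none => "None"
  | some n =>
    let st := (PySem.Int.toChars |n|).foldl
      (fun (st : List Char × Bool) d =>
        let odd := PySem.Int.mod ((PySem.Int.ofChars? [d]).getD 0) 2 == 1
        let out := if !st.1.isEmpty && (odd || st.2) then st.1 ++ ['-'] else st.1
        (out ++ [d], odd)) ([], false)
    String.ofList st.1

-- ===== PRECONDITION & SPEC =====
def Spec_dashatize (num : Option Int) (out : String) : Prop := out = dashatize_alt num
instance (num : Option Int) (out : String) : Decidable (Spec_dashatize num out) := by unfold Spec_dashatize; infer_instance

-- ===== CLAIM (what is proved, stated in full; the proofs are below) =====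
def Claim_equal_dashatize : Prop := ∀ (num : Option Int), Dom_dashatize num → Spec_dashatize num (dashatize num)

-- ===== LEMMAS AND PROOFS =====

-- "is this char an ASCII digit" (every char of str(abs(n)) satisfies it)
def isDig (c : Char) : Bool := c ∈ ['0','1','2','3','4','5','6','7','8','9']

def oddb (c : Char) : Bool := PySem.Int.mod ((PySem.Int.ofChars? [c]).getD 0) 2 == 1

-- canonical result: the digits, with a dash before digit c exactly when c or the previous digit is odd
def canonTail : Bool → List Char → List Char
  | _, [] => []
  | prev, c :: cs => (if oddb c || prev then ['-'] else []) ++ c :: canonTail (oddb c) cs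

-- A's built string with the two edge dashes stripped
def midL : List Char → List Char
  | [] => []
  | [c] => [c]
  | a :: b :: r =>
    [a] ++ (if oddb a then ['-'] else []) ++ (if oddb b then ['-'] else []) ++ midL (b :: r)

-- A's final filter, re-expressed as a previous-character scan
def go : Char → List Char → List Char
  | _, [] => []
  | prev, x :: xs => (if x != '-' || prev != '-' then [x] else []) ++ go x xs

theorem digitChar_isDig (n : Nat) (h : n < 10) : isDig (Nat.digitChar n) := by
  interval_cases n <;> decide

theorem toDigitsCore_isDig : ∀ (f n : Nat) (ds : List Char),
    (∀ c ∈ ds, isDig c) → ∀ c ∈ Nat.toDigitsCore 10 f n ds, isDig c := by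
  intro f
  induction f with
  | zero => intro n ds h c hc; simpa [Nat.toDigitsCore] using h c (by simpa [Nat.toDigitsCore] using hc)
  | succ f ih =>
    intro n ds h c hc
    simp only [Nat.toDigitsCore] at hc
    split at hc
    · rcases List.mem_cons.1 hc with rfl | hc
      · exact digitChar_isDig _ (Nat.mod_lt _ (by omega))
      · exact h c hc
    · exact ih _ _ (by
        intro d hd
        rcases List.mem_cons.1 hd with rfl | hd
        · exact digitChar_isDig _ (Nat.mod_lt _ (by omega))
        · exact h d hd) c hc

theorem toDigitsCore_ne_nil_of_acc : ∀ (f n : Nat) (ds : List Char), ds ≠ [] →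
    Nat.toDigitsCore 10 f n ds ≠ [] := by
  intro f
  induction f with
  | zero => intro n ds h; simpa [Nat.toDigitsCore] using h
  | succ f ih =>
    intro n ds h
    simp only [Nat.toDigitsCore]
    split
    · simp
    · exact ih _ _ (by simp)

theorem toChars_isDig (n : Int) : ∀ c ∈ PySem.Int.toChars |n|, isDig c := by
  have h0 : ¬ (|n| < 0) := not_lt.2 (abs_nonneg n)
  simp only [PySem.Int.toChars, if_neg h0]
  exact toDigitsCore_isDig _ _ [] (by simp)

theorem toChars_ne_nil (n : Int) : PySem.Int.toChars |n| ≠ [] := by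
  have h0 : ¬ (|n| < 0) := not_lt.2 (abs_nonneg n)
  simp only [PySem.Int.toChars, if_neg h0, Nat.toDigits]
  simp only [Nat.toDigitsCore]
  split
  · simp
  · exact toDigitsCore_ne_nil_of_acc _ _ _ (by simp)

theorem isDig_ne_dash {c : Char} (h : isDig c) : c ≠ '-' := by
  simp [isDig] at h
  rcases h with rfl|rfl|rfl|rfl|rfl|rfl|rfl|rfl|rfl|rfl <;> decide

theorem block_eq {c : Char} (h : isDig c) :
    (if pyIsEven ((PySem.Int.ofChars? [c]).getD 0) then [c] else ['-'] ++ [c] ++ ['-'])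
      = (if oddb c then ['-', c, '-'] else [c]) := by
  simp [isDig] at h
  rcases h with rfl|rfl|rfl|rfl|rfl|rfl|rfl|rfl|rfl|rfl <;> decide

theorem built_shape : ∀ (cs : List Char) (a : Char), (∀ c ∈ a :: cs, isDig c) →
    ((a :: cs).map (fun s =>
        if pyIsEven ((PySem.Int.ofChars? [s]).getD 0) then [s] else ['-'] ++ [s] ++ ['-'])).flatten
      = (if oddb a then ['-'] else []) ++ midL (a :: cs)
          ++ (if oddb ((a :: cs).getLast (by simp)) then ['-'] else []) := by
  intro cs
  induction cs with
  | nil =>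
    intro a h
    have hb := block_eq (h a (by simp))
    simp only [List.map, List.flatten, midL, List.getLast]
    rw [hb]
    by_cases ho : oddb a <;> simp [ho]
  | cons b r ih =>
    intro a h
    have hb := block_eq (h a (by simp))
    have hrest := ih b (by intro c hc; exact h c (List.mem_cons_of_mem _ hc))
    simp only [List.map, List.flatten] at hrest ⊢
    rw [hb, hrest, midL]
    have : (a :: b :: r).getLast (by simp) = (b :: r).getLast (by simp) := by
      simp [List.getLast_cons]
    rw [this]
    by_cases h1 : oddb a <;> by_cases h2 : oddb b <;> simp [h1, h2]

theorem midL_ne_nil (a : Char) (cs : List Char) : midL (a :: cs) ≠ [] := by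
  cases cs <;> simp [midL]

theorem midL_head? (a : Char) (cs : List Char) : (midL (a :: cs)).head? = some a := by
  cases cs <;> simp [midL]

theorem midL_getLast? : ∀ (cs : List Char) (a : Char),
    (midL (a :: cs)).getLast? = some ((a :: cs).getLast (by simp)) := by
  intro cs
  induction cs with
  | nil => intro a; simp [midL]
  | cons b r ih =>
    intro a
    rw [midL]
    rw [List.getLast?_append, ih b]
    simp [List.getLast_cons]

theorem enumFilter (T : List Char) : ∀ (t : List Char) (k : Nat), T.drop k = t →
    ((PySem.List.enumerate t (k : Int)).filter
        (fun is => is.2 != '-' || (is.2 == '-' && !(PySem.List.pyGetD T (is.1 - 1) ' ' == '-')))).map (·.2)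
      = go (PySem.List.pyGetD T ((k : Int) - 1) ' ') t := by
  intro t
  induction t with
  | nil => intro k hk; simp [PySem.List.enumerate_nil, go]
  | cons x xs ih =>
    intro k hk
    have hk' : T.drop (k + 1) = xs := by
      rw [← List.tail_drop, hk]; rfl
    have hTk : T[k]? = some x := by
      have : (T.drop k)[0]? = T[k]? := by simp [List.getElem?_drop]
      rw [hk] at this; simpa using this.symm
    have hprev : PySem.List.pyGetD T ((k : Int) + 1 - 1) ' ' = x := by
      have : ((k : Int) + 1 - 1) = ((k : Nat) : Int) := by omega
      rw [this, PySem.List.pyGetD_natCast]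
      simp [List.getD, hTk]
    have hcast : ((k : Int) + 1) = (((k + 1 : Nat)) : Int) := by push_cast; ring
    rw [PySem.List.enumerate_cons]
    have htail :
        ((PySem.List.enumerate xs ((k : Int) + 1)).filter
          (fun is => is.2 != '-' || (is.2 == '-' && !(PySem.List.pyGetD T (is.1 - 1) ' ' == '-')))).map (·.2) = go x xs := by
      rw [hcast, ih (k + 1) hk']
      have h2 : (((k + 1 : Nat)) : Int) - 1 = (k : Int) + 1 - 1 := by push_cast; ring
      rw [h2, hprev]
    simp only [List.filter_cons, go]
    by_cases hx : x = '-'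
    · subst hx
      by_cases hp : PySem.List.pyGetD T ((k : Int) - 1) ' ' = '-'
      · simp [hp, htail]
      · simp [hp, htail]
    · simp [hx, htail]

theorem go_mid : ∀ (cs : List Char) (a : Char) (prev : Char), (∀ c ∈ a :: cs, isDig c) →
    go prev (midL (a :: cs)) = a :: canonTail (oddb a) cs := by
  intro cs
  induction cs with
  | nil =>
    intro a prev h
    have ha := isDig_ne_dash (h a (by simp))
    simp [midL, go, canonTail, ha]
  | cons b r ih =>
    intro a prev h
    have ha := isDig_ne_dash (h a (by simp))
    have hb := isDig_ne_dash (h b (by simp))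
    have hr : ∀ p, go p (midL (b :: r)) = b :: canonTail (oddb b) r :=
      fun p => ih b p (by intro c hc; exact h c (List.mem_cons_of_mem _ hc))
    rw [midL]
    by_cases h1 : oddb a <;> by_cases h2 : oddb b <;>
      simp [h1, h2, go, ha, canonTail, hr]

theorem fold_tail : ∀ (cs : List Char) (out : List Char) (prev : Bool), out ≠ [] →
    (cs.foldl (fun (st : List Char × Bool) d =>
        let odd := PySem.Int.mod ((PySem.Int.ofChars? [d]).getD 0) 2 == 1
        let out := if !st.1.isEmpty && (odd || st.2) then st.1 ++ ['-'] else st.1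
        (out ++ [d], odd)) (out, prev)).1 = out ++ canonTail prev cs := by
  intro cs
  induction cs with
  | nil => intro out prev h; simp [canonTail]
  | cons c cs ih =>
    intro out prev h
    rw [List.foldl_cons]
    simp only []
    have hne : out.isEmpty = false := by simpa [List.isEmpty_iff] using h
    rw [ih _ _ (by simp), canonTail]
    simp only [hne, oddb, Bool.not_false, Bool.true_and]
    split_ifs <;> simp

theorem A_some (n : Int) (a : Char) (cs : List Char) (h : PySem.Int.toChars |n| = a :: cs) :
    dashatize (some n) = String.ofList (a :: canonTail (oddb a) cs) := by
  have hdig : ∀ c ∈ a :: cs, isDig c := by rw [← h]; exact toChars_isDig n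
  have hane := isDig_ne_dash (hdig a (by simp))
  have hlne := isDig_ne_dash (hdig _ (List.getLast_mem (l := a :: cs) (by simp)))
  simp only [dashatize]
  rw [h, built_shape cs a hdig]
  have hR1 : (if PySem.List.pyGet?
        ((if oddb a then ['-'] else []) ++ midL (a :: cs)
          ++ (if oddb ((a :: cs).getLast (by simp)) then ['-'] else [])) 0 == some '-'
      then PySem.List.slice
        ((if oddb a then ['-'] else []) ++ midL (a :: cs)
          ++ (if oddb ((a :: cs).getLast (by simp)) then ['-'] else [])) (some 1) none
      else ((if oddb a then ['-'] else []) ++ midL (a :: cs)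
          ++ (if oddb ((a :: cs).getLast (by simp)) then ['-'] else [])))
      = midL (a :: cs) ++ (if oddb ((a :: cs).getLast (by simp)) then ['-'] else []) := by
    by_cases ho : oddb a
    · simp only [ho, if_pos, List.cons_append, List.nil_append]
      rw [PySem.List.pyGet?_zero_cons]
      simp [PySem.List.slice_from_one]
    · simp only [ho, if_neg, Bool.false_eq_true, not_false_iff, List.nil_append]
      have h0 : PySem.List.pyGet? (midL (a :: cs)
          ++ (if oddb ((a :: cs).getLast (by simp)) then ['-'] else [])) 0 = some a := by
        rw [PySem.List.pyGet?_zero]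
        rw [List.getElem?_append_left (by
          have := midL_ne_nil a cs; exact List.length_pos_iff.2 this)]
        rw [← List.head?_eq_getElem?, midL_head?]
      rw [h0]
      simp [hane]
  rw [hR1]
  have hR2 : (if PySem.List.pyGet?
        (midL (a :: cs) ++ (if oddb ((a :: cs).getLast (by simp)) then ['-'] else [])) (-1) == some '-'
      then PySem.List.slice
        (midL (a :: cs) ++ (if oddb ((a :: cs).getLast (by simp)) then ['-'] else [])) none (some (-1))
      else (midL (a :: cs) ++ (if oddb ((a :: cs).getLast (by simp)) then ['-'] else [])))
      = midL (a :: cs) := by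
    by_cases hl : oddb ((a :: cs).getLast (by simp))
    · simp only [hl, if_pos]
      rw [PySem.List.pyGet?_neg_one]
      rw [List.getLast?_concat]
      simp [PySem.List.slice_to_neg_one]
    · simp only [hl, if_neg, Bool.false_eq_true, not_false_iff, List.append_nil]
      rw [PySem.List.pyGet?_neg_one, midL_getLast?]
      simp [hlne]
  rw [hR2]
  have hmain := enumFilter (midL (a :: cs)) (midL (a :: cs)) 0 (by simp)
  simp only [Nat.cast_zero] at hmain
  rw [hmain, go_mid cs a _ hdig]

theorem B_some (n : Int) (a : Char) (cs : List Char) (h : PySem.Int.toChars |n| = a :: cs) :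
    dashatize_alt (some n) = String.ofList (a :: canonTail (oddb a) cs) := by
  simp only [dashatize_alt]
  rw [h, List.foldl_cons]
  simp only [List.isEmpty_nil, Bool.not_true, Bool.false_and, if_neg (by simp : ¬ (false = true)),
    List.nil_append]
  rw [fold_tail cs [a] _ (by simp)]
  rfl

-- ===== VERDICT (by name: the statement is the Claim_ definition above) =====
theorem dashatize_spec : Claim_equal_dashatize := by
  unfold Claim_equal_dashatize Spec_dashatize
  intro num _
  cases num with
  | none => rfl
  | some n =>
    obtain ⟨a, cs, h⟩ : ∃ a cs, PySem.Int.toChars |n| = a :: cs := by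
      cases hx : PySem.Int.toChars |n| with
      | nil => exact absurd hx (toChars_ne_nil n)
      | cons a cs => exact ⟨a, cs, rfl⟩
    rw [A_some n a cs h, B_some n a cs h]
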